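-- pv_equiv track=rewrite | github.com/gilsanguk/Algorithm | 백준/Gold/1107. 리모컨/리모컨.py | low_channel
-- ===== SOURCE A (Python) =====
-- def low_channel(lst,N):
--     for i in range(N,-1,-1):
--         for j in range(len(str(i))):
--             if str(i)[j] in lst:
--                 break
--             elif j==len(str(i))-1:
--                 return (N-i)+len(str(i))
--     return 1000001
-- ===== SOURCE B (Python) =====
-- def low_channel(lst, N):
--     # Jump search: from N, repeatedly skip the whole block of numbers that
--     # share the first broken digit, instead of decrementing one by one.
--     # The broken buttons are put in a set once, before the loop.
--     broken = set(lst)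
--     i = N
--     while i >= 0:
--         s = str(i)
--         bad = None
--         for j, c in enumerate(s):
--             if c in broken:
--                 bad = j
--                 break
--         if bad is None:
--             return (N - i) + len(s)
--         i = i - i % 10 ** (len(s) - 1 - bad) - 1
--     return 1000001
-- ===== Notes on version B (the rewrite author's own statement) =====
-- stated objective: alternative
-- what changed: Instead of decrementing i one by one from N and re-checking every number's digits against the raw list, B puts the broken buttons in a set once and jumps directly below the whole block of numbers sharing the first broken digit (i -= i % 10**k + 1), so only a few candidates are ever inspected.
import Mathlib
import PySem

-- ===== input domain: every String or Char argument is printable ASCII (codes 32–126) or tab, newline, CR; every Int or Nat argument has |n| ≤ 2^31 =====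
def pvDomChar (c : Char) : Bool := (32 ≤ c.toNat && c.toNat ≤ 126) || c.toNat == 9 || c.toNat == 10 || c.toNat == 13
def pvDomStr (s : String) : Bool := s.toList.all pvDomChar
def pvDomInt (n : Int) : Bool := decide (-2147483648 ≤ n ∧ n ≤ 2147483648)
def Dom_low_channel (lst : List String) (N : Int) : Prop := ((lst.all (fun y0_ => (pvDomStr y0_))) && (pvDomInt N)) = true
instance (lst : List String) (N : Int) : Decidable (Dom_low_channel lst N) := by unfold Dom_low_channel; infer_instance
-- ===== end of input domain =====

-- B replaces A's one-by-one countdown from N with digit-block jumps (i -= i % 10**k + 1 below the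
-- first broken digit) over a set of the broken buttons: a structurally different search that
-- returns the same value for the same largest reachable channel.


-- ===== PORT A =====
-- inner 'for j in range(len(str(i)))' loop; returns true exactly when the Python 'return' fires
def lowAInner (lst : List String) (s : String) : List Int → Bool
  | [] => false
  | j :: rest =>
    match PySem.Str.pyGet? s j with
    | none => false   -- unreachable guard: j ranges over range(len(s))
    | some c =>
      if lst.contains (String.ofList [c]) then false          -- break
      else if j = PySem.Str.len s - 1 then true               -- return (N-i)+len(str(i))
      else lowAInner lst s rest

-- outer 'for i in range(N,-1,-1)' loop (range is a lazy iterator: ported as countdown recursion)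
def lowAOuter (lst : List String) (N : Int) (i : Int) : Int :=
  if _h : -1 < i then
    if lowAInner lst (PySem.Int.toStr i)
        (PySem.List.pyRange 0 (PySem.Str.len (PySem.Int.toStr i)) 1)
    then (N - i) + PySem.Str.len (PySem.Int.toStr i)
    else lowAOuter lst N (i - 1)
  else 1000001
termination_by (i + 1).toNat
decreasing_by omega

def low_channel (lst : List String) (N : Int) : Int :=
  lowAOuter lst N N

-- ===== PORT B =====
-- 'for j, c in enumerate(s): if c in broken: bad = j; break'
def lowBFirstBad (broken : PySem.Set String) : List (Int × Char) → Option Int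
  | [] => none
  | (j, c) :: rest =>
    if PySem.Set.contains broken (String.ofList [c]) then some j else lowBFirstBad broken rest

-- 'while i >= 0: …' ; the exponent len(s)-1-bad is a nonnegative Nat since bad < len(s)
def lowBLoop (broken : PySem.Set String) (N : Int) (i : Int) : Int :=
  if _h : 0 ≤ i then
    match lowBFirstBad broken (PySem.List.enumerate (PySem.Int.toChars i) 0) with
    | none => (N - i) + ((PySem.Int.toChars i).length : Int)
    | some j =>
      lowBLoop broken N
        (i - PySem.Int.mod i (10 ^ ((PySem.Int.toChars i).length - 1 - j.toNat)) - 1)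
  else 1000001
termination_by (i + 1).toNat
decreasing_by
  rw [PySem.Int.mod_eq_emod_of_pos (by positivity)]
  omega

-- 'broken = set(lst)' is built once, before the loop
def low_channel_alt (lst : List String) (N : Int) : Int :=
  lowBLoop (PySem.Set.ofList lst) N N

-- ===== PRECONDITION & SPEC =====
def Spec_low_channel (lst : List String) (N : Int) (out : Int) : Prop := out = low_channel_alt lst N
instance (lst : List String) (N : Int) (out : Int) : Decidable (Spec_low_channel lst N out) := by unfold Spec_low_channel; infer_instance

-- ===== CLAIM (what is proved, stated in full; the proofs are below) =====
def Claim_equal_low_channel : Prop := ∀ (lst : List String) (N : Int), Dom_low_channel lst N → Spec_low_channel lst N (low_channel lst N)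

-- ===== LEMMAS AND PROOFS =====

-- a digit char c of str(i) is usable iff the one-char string is not in the broken list
def goodC (lst : List String) (c : Char) : Bool := !(lst.contains (String.ofList [c]))

-- i (≥ 0) is a reachable channel iff every digit of str(i) is usable
def validI (lst : List String) (i : Int) : Bool :=
  (PySem.Int.toChars i).all (goodC lst)

-- normal form of Nat.toDigits 10: decimal digits, most significant first
def charsN (n : Nat) : List Char :=
  if n < 10 then [Nat.digitChar n]
  else charsN (n / 10) ++ [Nat.digitChar (n % 10)]
termination_by n
decreasing_by omega

-- the k low decimal digits of r, zero-padded to width k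
def padC : Nat → Nat → List Char
  | 0, _ => []
  | k + 1, r => padC k (r / 10) ++ [Nat.digitChar (r % 10)]

lemma toDigitsCore_eq_charsN : ∀ (fuel n : Nat) (ds : List Char), n < fuel →
    Nat.toDigitsCore 10 fuel n ds = charsN n ++ ds := by
  intro fuel
  induction fuel with
  | zero => omega
  | succ f ih =>
    intro n ds hn
    rw [Nat.toDigitsCore]
    by_cases h10 : n < 10
    · have h0 : n / 10 = 0 := by omega
      have hm : n % 10 = n := Nat.mod_eq_of_lt h10
      simp [h0, hm, charsN, h10]
    · have hne : ¬ n / 10 = 0 := by omega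
      simp only [hne, if_false]
      rw [ih (n / 10) _ (by omega)]
      conv_rhs => rw [charsN, if_neg h10]
      simp

lemma toChars_nonneg (i : Int) (h : 0 ≤ i) :
    PySem.Int.toChars i = charsN i.toNat := by
  rw [PySem.Int.toChars, if_neg (by omega)]
  unfold Nat.toDigits
  rw [toDigitsCore_eq_charsN _ _ _ (Nat.lt_succ_self _), List.append_nil]

lemma charsN_ne_nil (n : Nat) : charsN n ≠ [] := by
  rw [charsN]; split <;> simp

lemma length_padC (k r : Nat) : (padC k r).length = k := by
  induction k generalizing r with
  | zero => rfl
  | succ k ih => simp [padC, ih]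

lemma pow_le_charsN (n : Nat) (h : 1 ≤ n) : 10 ^ ((charsN n).length - 1) ≤ n := by
  induction n using Nat.strong_induction_on with
  | _ n ih =>
    rw [charsN]
    by_cases h10 : n < 10
    · simpa [h10] using h
    · have h1 : 1 ≤ n / 10 := by omega
      have := ih (n / 10) (by omega) h1
      have hne := charsN_ne_nil (n / 10)
      simp only [h10, if_false, List.length_append, List.length_cons, List.length_nil]
      have hl : 1 ≤ (charsN (n / 10)).length := List.length_pos_iff.mpr hne
      have : 10 ^ ((charsN (n / 10)).length + 1 - 1) ≤ n / 10 * 10 := by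
        rw [Nat.add_sub_cancel]
        calc 10 ^ (charsN (n / 10)).length
            = 10 ^ ((charsN (n / 10)).length - 1) * 10 := by
              rw [← pow_succ]; congr 1; omega
          _ ≤ n / 10 * 10 := by exact Nat.mul_le_mul_right 10 this
      calc 10 ^ ((charsN (n / 10)).length + 1 - 1) ≤ n / 10 * 10 := this
        _ ≤ n := by omega

lemma charsN_decomp (k p r : Nat) (hp : 1 ≤ p) (hr : r < 10 ^ k) :
    charsN (p * 10 ^ k + r) = charsN p ++ padC k r := by
  induction k generalizing r with
  | zero =>
    have : r = 0 := by omega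
    simp [this, padC]
  | succ k ih =>
    have hpow : 1 ≤ 10 ^ k := Nat.one_le_pow _ _ (by omega)
    have hm : ¬ p * 10 ^ (k + 1) + r < 10 := by
      have : 10 ≤ 10 ^ (k + 1) := by
        calc 10 = 1 * 10 := by omega
          _ ≤ 10 ^ k * 10 := by exact Nat.mul_le_mul_right 10 hpow
          _ = 10 ^ (k + 1) := by rw [pow_succ]
      nlinarith
    rw [charsN, if_neg hm]
    have hrw : p * 10 ^ (k + 1) + r = (p * 10 ^ k) * 10 + r := by ring
    have hdiv : (p * 10 ^ (k + 1) + r) / 10 = p * 10 ^ k + r / 10 := by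
      rw [hrw]; generalize p * 10 ^ k = a; omega
    have hmod : (p * 10 ^ (k + 1) + r) % 10 = r % 10 := by
      rw [hrw]; generalize p * 10 ^ k = a; omega
    rw [hdiv, hmod, ih (r / 10) (by rw [pow_succ] at hr; omega)]
    simp [padC]

-- the jump in B skips only unreachable channels: every v in the block
-- [n - n % 10^k, n] still carries the broken digit of n sitting at position j
lemma block_invalid (lst : List String) (n j k : Nat)
    (hlen : (charsN n).length = j + 1 + k)
    (hbad : goodC lst ((charsN n).getD j ' ') = false) :
    ∀ v : Nat, n - n % 10 ^ k ≤ v → v ≤ n → (charsN v).all (goodC lst) = false := by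
  intro v hv1 hv2
  rcases Nat.eq_zero_or_pos k with hk | hk
  · -- k = 0 : the block is {n} itself
    subst hk
    have hvn : v = n := by simp at hv1; omega
    subst hvn
    have hjlt : j < (charsN v).length := by omega
    refine List.all_eq_false.mpr ⟨(charsN v).getD j ' ', ?_, by simpa using hbad⟩
    rw [List.getD_eq_getElem _ _ hjlt]
    exact List.getElem_mem hjlt
  · -- k ≥ 1 : decompose n and v over the common prefix p
    have hn1 : 1 ≤ n := by
      by_contra h
      have : n = 0 := by omega
      subst this
      rw [charsN] at hlen
      simp at hlen; omega
    have hpowk : 1 ≤ 10 ^ k := Nat.one_le_pow _ _ (by omega)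
    have hnpow : 10 ^ (j + k) ≤ n := by
      have := pow_le_charsN n hn1
      rw [hlen] at this
      simpa using this
    set p := n / 10 ^ k with hp
    have hp1 : 1 ≤ p := by
      rw [hp]
      rw [Nat.le_div_iff_mul_le (by omega)]
      calc 1 * 10 ^ k = 10 ^ k := by ring
        _ ≤ 10 ^ (j + k) := Nat.pow_le_pow_right (by omega) (by omega)
        _ ≤ n := hnpow
    have hPdm : p * 10 ^ k + n % 10 ^ k = n := by
      rw [Nat.mul_comm]; exact Nat.div_add_mod n (10 ^ k)
    have hnd : n = p * 10 ^ k + n % 10 ^ k := hPdm.symm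
    have hlow : n - n % 10 ^ k = p * 10 ^ k := by omega
    have hvlow : p * 10 ^ k ≤ v := by omega
    have hr' : v - p * 10 ^ k < 10 ^ k := by
      have : n % 10 ^ k < 10 ^ k := Nat.mod_lt _ (by omega)
      omega
    have hvd : v = p * 10 ^ k + (v - p * 10 ^ k) := by omega
    have hcv : charsN v = charsN p ++ padC k (v - p * 10 ^ k) := by
      conv_lhs => rw [hvd]
      exact charsN_decomp k p _ hp1 hr'
    have hcn : charsN n = charsN p ++ padC k (n % 10 ^ k) := by
      conv_lhs => rw [hnd]
      exact charsN_decomp k p _ hp1 (Nat.mod_lt _ (by omega))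
    have hlp : (charsN p).length = j + 1 := by
      have := congrArg List.length hcn
      rw [hlen] at this
      simp [length_padC] at this
      omega
    have hget : (charsN n).getD j ' ' = (charsN p).getD j ' ' := by
      rw [hcn]
      exact List.getD_append _ _ _ _ (by omega)
    refine List.all_eq_false.mpr ⟨(charsN p).getD j ' ', ?_, ?_⟩
    · rw [hcv]
      refine List.mem_append_left _ ?_
      rw [List.getD_eq_getElem _ _ (by omega)]
      exact List.getElem_mem (by omega)
    · rw [← hget]; simpa using hbad

-- == A-side characterisation ==

lemma lowAInner_eq_all (lst : List String) (s : String) :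
    ∀ j : Nat, j < s.toList.length →
      lowAInner lst s (PySem.List.pyRange (j : Int) (PySem.Str.len s) 1)
        = (s.toList.drop j).all (goodC lst) := by
  intro j hj
  induction hdist : s.toList.length - j generalizing j with
  | zero => omega
  | succ d ih =>
    have hlen : PySem.Str.len s = (s.toList.length : Int) := by
      simp [PySem.Str.len]
    rw [PySem.List.pyRange_one_cons (by omega : (j : Int) < PySem.Str.len s)]
    rw [lowAInner]
    have hget : PySem.Str.pyGet? s (j : Int) = some (s.toList[j]) := by
      rw [PySem.Str.pyGet?, PySem.Chars.pyGet?, PySem.List.pyGet?_natCast,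
        List.getElem?_eq_getElem hj]
    rw [hget]
    have hdrop : s.toList.drop j = s.toList[j] :: s.toList.drop (j + 1) :=
      List.drop_eq_getElem_cons hj
    rw [hdrop, List.all_cons]
    by_cases hc : lst.contains (String.ofList [s.toList[j]]) = true
    · have hmem : String.ofList [s.toList[j]] ∈ lst := by simpa using hc
      simp [goodC, hmem]
    · simp only [Bool.not_eq_true] at hc
      have hnm : String.ofList [s.toList[j]] ∉ lst := by simpa using hc
      simp only [hc, Bool.false_eq_true, if_false]
      by_cases hlast : (j : Int) = PySem.Str.len s - 1
      · simp only [hlast, if_true]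
        have hje : j + 1 = s.toList.length := by rw [hlen] at hlast; omega
        rw [List.drop_eq_nil_iff.mpr (by omega)]
        simp [goodC, hnm]
      · simp only [hlast, if_false]
        have hjlt : j + 1 < s.toList.length := by
          rw [hlen] at hlast; omega
        have hcast : ((j : Int) + 1) = ((j + 1 : Nat) : Int) := by push_cast; ring
        rw [hcast, ih (j + 1) hjlt (by omega)]
        simp [goodC, hnm]

lemma lowAInner_eq_validI (lst : List String) (i : Int) (hi : 0 ≤ i) :
    lowAInner lst (PySem.Int.toStr i)
      (PySem.List.pyRange 0 (PySem.Str.len (PySem.Int.toStr i)) 1) = validI lst i := by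
  have hne : (PySem.Int.toStr i).toList ≠ [] := by
    rw [PySem.Int.toList_toStr, toChars_nonneg i hi]
    exact charsN_ne_nil _
  have h0 : ((0 : Nat) : Int) = (0 : Int) := rfl
  rw [← h0, lowAInner_eq_all lst _ 0 (List.length_pos_iff.mpr hne)]
  rw [List.drop_zero, validI, ← PySem.Int.toList_toStr]

lemma lowAOuter_step (lst : List String) (N i : Int) (hi : 0 ≤ i) :
    lowAOuter lst N i
      = if validI lst i then (N - i) + ((PySem.Int.toChars i).length : Int)
        else lowAOuter lst N (i - 1) := by
  rw [lowAOuter, dif_pos (by omega : (-1 : Int) < i), lowAInner_eq_validI lst i hi]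
  have : PySem.Str.len (PySem.Int.toStr i) = ((PySem.Int.toChars i).length : Int) := by
    simp [PySem.Str.len, PySem.Int.toList_toStr]
  rw [this]

lemma lowAOuter_skip (lst : List String) (N : Int) :
    ∀ (d : Nat) (a : Int), -1 ≤ a - d →
      (∀ v : Int, a - d < v → v ≤ a → validI lst v = false) →
      lowAOuter lst N a = lowAOuter lst N (a - d) := by
  intro d
  induction d with
  | zero => intro a _ _; simp
  | succ d ih =>
    intro a hlow hall
    have ha : 0 ≤ a := by push_cast at hlow ⊢; omega
    rw [lowAOuter_step lst N a ha]
    rw [hall a (by push_cast; omega) le_rfl]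
    simp only [Bool.false_eq_true, if_false]
    have := ih (a - 1) (by push_cast at hlow ⊢; omega)
      (fun v h1 h2 => hall v (by push_cast at h1 ⊢; omega) (by omega))
    rw [this]
    congr 1
    push_cast
    ring

-- == B-side characterisation ==

-- membership in set(lst) is membership in lst
lemma goodCS (lst : List String) (c : Char) :
    PySem.Set.contains (PySem.Set.ofList lst) (String.ofList [c]) = !(goodC lst c) := by
  simp [goodC, PySem.Set.contains, PySem.Set.mem_ofList]

lemma lowBFirstBad_none (lst : List String) :
    ∀ (cs : List Char) (s0 : Int),
      lowBFirstBad (PySem.Set.ofList lst) (PySem.List.enumerate cs s0) = none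
        ↔ cs.all (goodC lst) = true := by
  intro cs
  induction cs with
  | nil => intro s0; simp [PySem.List.enumerate_nil, lowBFirstBad]
  | cons c t ih =>
    intro s0
    rw [PySem.List.enumerate_cons, lowBFirstBad, goodCS]
    by_cases hc : goodC lst c = true
    · simp [hc, ih (s0 + 1)]
    · simp only [Bool.not_eq_true] at hc
      simp [hc]

lemma lowBFirstBad_some (lst : List String) :
    ∀ (cs : List Char) (s0 j : Int),
      lowBFirstBad (PySem.Set.ofList lst) (PySem.List.enumerate cs s0) = some j →
      s0 ≤ j ∧ (j - s0).toNat < cs.length ∧ goodC lst (cs.getD (j - s0).toNat ' ') = false := by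
  intro cs
  induction cs with
  | nil => intro s0 j h; simp [PySem.List.enumerate_nil, lowBFirstBad] at h
  | cons c t ih =>
    intro s0 j h
    rw [PySem.List.enumerate_cons, lowBFirstBad, goodCS] at h
    by_cases hc : goodC lst c = true
    · simp only [hc, Bool.not_true, Bool.false_eq_true, if_false] at h
      obtain ⟨h1, h2, h3⟩ := ih (s0 + 1) j h
      have hpos : 0 < (j - s0).toNat := by omega
      have hswap : (j - (s0 + 1)).toNat = (j - s0).toNat - 1 := by omega
      refine ⟨by omega, by simp; omega, ?_⟩
      rw [hswap] at h3
      have : (c :: t).getD (j - s0).toNat ' ' = t.getD ((j - s0).toNat - 1) ' ' := by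
        rcases Nat.exists_eq_add_of_lt hpos with ⟨m, hm⟩
        have : (j - s0).toNat = m + 1 := by omega
        simp [this]
      rw [this]
      exact h3
    · simp only [Bool.not_eq_true] at hc
      simp only [hc, Bool.not_false, if_true, Option.some.injEq] at h
      subst h
      exact ⟨le_rfl, by simp, by simpa using hc⟩

-- == main induction: B's jump loop equals A's countdown scan ==

lemma lowBLoop_eq_scan (lst : List String) (N : Int) :
    ∀ (i : Int), lowBLoop (PySem.Set.ofList lst) N i = lowAOuter lst N i := by
  intro i
  induction hm : (i + 1).toNat using Nat.strong_induction_on generalizing i with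
  | _ m ih =>
  subst hm
  by_cases hi : 0 ≤ i
  · rw [lowBLoop, dif_pos hi]
    cases hfb : lowBFirstBad (PySem.Set.ofList lst) (PySem.List.enumerate (PySem.Int.toChars i) 0) with
    | none =>
      have hv : validI lst i = true := by
        rw [validI, ← lowBFirstBad_none lst _ 0]
        exact hfb
      rw [lowAOuter_step lst N i hi, hv, if_pos rfl]
    | some j =>
      obtain ⟨hj0, hjlt, hbad⟩ := lowBFirstBad_some lst _ 0 j hfb
      simp only [sub_zero] at hjlt hbad
      set cs := PySem.Int.toChars i with hcs
      set k := cs.length - 1 - j.toNat with hk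
      have hpow : (0 : Int) < 10 ^ k := by positivity
      have hmod : PySem.Int.mod i (10 ^ k) = i % 10 ^ k :=
        PySem.Int.mod_eq_emod_of_pos hpow
      set i' := i - PySem.Int.mod i (10 ^ k) - 1 with hi'
      have hmod0 : 0 ≤ i % 10 ^ k := Int.emod_nonneg i (by positivity)
      have hmodle : i % 10 ^ k ≤ i := by
        by_cases hcase : i < 10 ^ k
        · rw [Int.emod_eq_of_lt hi hcase]
        · have := Int.emod_lt_of_pos i hpow
          omega
      have hcsN : cs = charsN i.toNat := by rw [hcs]; exact toChars_nonneg i hi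
      -- every skipped v is invalid
      have hinv : ∀ v : Int, i' < v → v ≤ i → validI lst v = false := by
        intro v h1 h2
        have hv0 : 0 ≤ v := by rw [hi', hmod] at h1; omega
        rw [validI, toChars_nonneg v hv0]
        refine block_invalid lst i.toNat j.toNat k ?_ ?_ v.toNat ?_ ?_
        · rw [← hcsN]; omega
        · rw [← hcsN]; exact hbad
        · have hcast : (i.toNat : Int) % ((10 : Int) ^ k) = ((i.toNat % 10 ^ k : Nat) : Int) := by
            push_cast; rfl
          have : (i.toNat : Int) = i := by omega
          rw [this] at hcast
          rw [hi', hmod] at h1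
          omega
        · omega
      have hlow : -1 ≤ i' := by rw [hi', hmod]; omega
      have hd : i - (((i - i').toNat : Nat) : Int) = i' := by
        rw [hi', hmod] at *; omega
      show lowBLoop (PySem.Set.ofList lst) N i' = lowAOuter lst N i
      rw [ih (i' + 1).toNat (by rw [hi', hmod]; omega) i' rfl]
      have := lowAOuter_skip lst N (i - i').toNat i (by rw [hd]; exact hlow)
        (by rw [hd]; exact hinv)
      rw [hd] at this
      rw [this]
  · rw [lowBLoop, dif_neg hi, lowAOuter, dif_neg (by omega : ¬ (-1 : Int) < i)]

-- ===== VERDICT (by name: the statement is the Claim_ definition above) =====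
theorem low_channel_spec : Claim_equal_low_channel := by
  intro lst N _
  unfold Spec_low_channel low_channel low_channel_alt
  exact (lowBLoop_eq_scan lst N N).symm
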